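-- pv_equiv track=rewrite | github.com/alijkhalil/dl_utilities | datasets/dataset_utils.py | convert_str_to_char_list
-- ===== SOURCE A (Python) =====
-- special_chars = [ '^', '$', ' ', '\'' ]
--
-- alpha_chars = [ chr(ord('a') + i) for i in range(26) ]
--
-- digit_chars = [ chr(ord('0') + i) for i in range(10) ]
--
-- def convert_str_to_char_list(input_str):
--     min_char_ord = ord('a')
--     min_digit_ord = ord('0')
--
--     special_start = 1
--     alpha_start = len(special_chars) + special_start
--     digit_start = len(alpha_chars) + alpha_start
--
--     def find_index(item, list):
--         for i, tmp_item in enumerate(list):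
--             if item == tmp_item:
--                 return i
--
--         return 0
--
--     # Transform string into list of chars (omitting unusual chars)
--     char_list = []
--     for char in input_str:
--         if char in special_chars:
--             char_list.append(find_index(char, special_chars) + special_start)
--
--         elif char >= 'a' and char <= 'z':
--             char_list.append(ord(char) - min_char_ord + alpha_start)
--
--         elif char in digit_chars:
--             char_list.append(ord(char) - min_digit_ord + digit_start)
--
--
--     # Return char review list
--     return char_list
-- ===== SOURCE B (Python) =====
-- special_chars = [ '^', '$', ' ', '\'' ]
--
-- alpha_chars = [ chr(ord('a') + i) for i in range(26) ]
--
-- digit_chars = [ chr(ord('0') + i) for i in range(10) ]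
--
-- # One master alphabet string; a character's 1-based position in it IS its code
-- # (specials 1-4, a-z 5-30, digits 31-40). No branch classification at all.
-- _ALPHABET = "^$ 'abcdefghijklmnopqrstuvwxyz0123456789"
--
-- def convert_str_to_char_list(input_str):
--     return [_ALPHABET.find(c) + 1 for c in input_str if c in _ALPHABET]
-- ===== Notes on version B (the rewrite author's own statement) =====
-- stated objective: simpler
-- what changed: Replaces the three-way class branches, linear find_index and per-class ord offsets with a single master alphabet string in which each valid character's 1-based position is its code, so the whole function is one filter+position comprehension.
import Mathlib
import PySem

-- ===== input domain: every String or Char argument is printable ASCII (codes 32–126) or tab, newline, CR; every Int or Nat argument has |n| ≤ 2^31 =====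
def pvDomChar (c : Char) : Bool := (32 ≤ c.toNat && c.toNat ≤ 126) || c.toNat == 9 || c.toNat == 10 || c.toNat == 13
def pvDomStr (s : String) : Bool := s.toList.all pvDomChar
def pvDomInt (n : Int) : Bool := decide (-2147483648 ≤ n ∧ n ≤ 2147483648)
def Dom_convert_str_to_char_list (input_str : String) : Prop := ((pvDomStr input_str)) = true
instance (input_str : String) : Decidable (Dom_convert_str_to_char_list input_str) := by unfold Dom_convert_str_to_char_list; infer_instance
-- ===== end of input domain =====

-- B replaces A's three-way branch classification with one master alphabet string whose
-- 1-based positions are the codes (simpler; return value proved equal on Dom).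

-- ===== PORT A =====
-- module constants
def pvSpecialChars : List Char := ['^', '$', ' ', '\'']
def pvAlphaChars : List Char := (List.range 26).map (fun i => Char.ofNat ('a'.toNat + i))
def pvDigitChars : List Char := (List.range 10).map (fun i => Char.ofNat ('0'.toNat + i))

-- inner helper find_index (returns 0 when absent, as in A)
def pvFindIndexAux (item : Char) (l : List Char) (i : Nat) : Int :=
  match l with
  | [] => 0
  | x :: xs => if item = x then (i : Int) else pvFindIndexAux item xs (i + 1)

def pvFindIndex (item : Char) (l : List Char) : Int := pvFindIndexAux item l 0

-- loop body of A: the three-way if/elif chain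
def pvStepA (acc : List Int) (c : Char) : List Int :=
  if c ∈ pvSpecialChars then
    acc ++ [pvFindIndex c pvSpecialChars + 1]
  else if 'a' ≤ c ∧ c ≤ 'z' then
    acc ++ [((c.toNat : Int) - ('a'.toNat : Int)) + ((pvSpecialChars.length : Int) + 1)]
  else if c ∈ pvDigitChars then
    acc ++ [((c.toNat : Int) - ('0'.toNat : Int)) + ((pvAlphaChars.length : Int) + ((pvSpecialChars.length : Int) + 1))]
  else
    acc

def convert_str_to_char_list (input_str : String) : List Int :=
  input_str.toList.foldl pvStepA []

-- ===== PORT B =====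
-- the master alphabet: a valid char's 1-based position in it is its code
def pvAlphabet : String := "^$ 'abcdefghijklmnopqrstuvwxyz0123456789"

def convert_str_to_char_list_alt (input_str : String) : List Int :=
  (input_str.toList.filter (fun c => PySem.Str.isIn (String.singleton c) pvAlphabet)).map
    (fun c => PySem.Str.find pvAlphabet (String.singleton c) + 1)

-- ===== PRECONDITION & SPEC =====
def Spec_convert_str_to_char_list (input_str : String) (out : List Int) : Prop := out = convert_str_to_char_list_alt input_str
instance (input_str : String) (out : List Int) : Decidable (Spec_convert_str_to_char_list input_str out) := by unfold Spec_convert_str_to_char_list; infer_instance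

-- ===== CLAIM =====
def Claim_equal_convert_str_to_char_list : Prop := ∀ (input_str : String), Dom_convert_str_to_char_list input_str → Spec_convert_str_to_char_list input_str (convert_str_to_char_list input_str)

-- ===== LEMMAS AND PROOFS =====

-- B's value on one character (the comprehension's contribution)
def pvStepB (c : Char) : List Int :=
  if PySem.Str.isIn (String.singleton c) pvAlphabet then
    [PySem.Str.find pvAlphabet (String.singleton c) + 1]
  else []

-- A's step only appends past the accumulator
lemma pvStepA_acc (acc : List Int) (c : Char) : pvStepA acc c = acc ++ pvStepA [] c := by
  unfold pvStepA; split_ifs <;> simp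

-- B as a flatMap of the per-character contributions
lemma pvAlt_flatMap (l : List Char) :
    (l.filter (fun c => PySem.Str.isIn (String.singleton c) pvAlphabet)).map
      (fun c => PySem.Str.find pvAlphabet (String.singleton c) + 1) = l.flatMap pvStepB := by
  induction l with
  | nil => rfl
  | cons c cs ih =>
    rw [List.filter_cons]
    by_cases h : PySem.Str.isIn (String.singleton c) pvAlphabet
    · rw [if_pos h, List.map_cons, ih, List.flatMap_cons]
      unfold pvStepB
      rw [if_pos h, List.singleton_append]
    · rw [if_neg h, ih, List.flatMap_cons]
      unfold pvStepB
      rw [if_neg h, List.nil_append]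

-- the two per-character contributions agree on every domain character
set_option maxRecDepth 8192 in
lemma pvStep_range : ∀ n ∈ List.range 127, pvStepA [] (Char.ofNat n) = pvStepB (Char.ofNat n) := by
  decide

set_option maxRecDepth 8192 in
lemma pvStep_eq (c : Char) (h : pvDomChar c = true) : pvStepA [] c = pvStepB c := by
  have hlt : c.toNat < 127 := by
    simp [pvDomChar] at h
    omega
  have hc : Char.ofNat c.toNat = c := Char.ofNat_toNat c
  rw [← hc, pvStep_range c.toNat (List.mem_range.mpr hlt)]

-- A's fold equals the concatenation of per-character contributions
lemma pvFold_eq : ∀ (l : List Char), l.all pvDomChar = true →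
    ∀ acc : List Int, l.foldl pvStepA acc = acc ++ l.flatMap pvStepB := by
  intro l
  induction l with
  | nil => intro _ acc; simp
  | cons c cs ih =>
    intro h acc
    simp only [List.all_cons, Bool.and_eq_true] at h
    rw [List.foldl_cons, pvStepA_acc, pvStep_eq c h.1, ih h.2, List.flatMap_cons,
      List.append_assoc]

-- ===== VERDICT =====
theorem convert_str_to_char_list_spec : Claim_equal_convert_str_to_char_list := by
  intro s hdom
  unfold Spec_convert_str_to_char_list convert_str_to_char_list convert_str_to_char_list_alt
  rw [pvAlt_flatMap, pvFold_eq s.toList hdom []]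
  simp
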